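-- pv_equiv track=rewrite | github.com/zzmeii/diploma | patterns.py | ga_chose
-- ===== SOURCE A (Python) =====
-- def ga_chose(names, indv):
--     chosen = []
--     for i in range(len(indv)):
--         if indv[i]:
--             if names[i].replace('-', '') in chosen:
--                 chosen.remove(names[i].replace('-', ''))
--                 continue
--             chosen.append(names[i])
--     return chosen
-- ===== SOURCE B (Python) =====
-- def ga_chose(names, indv):
--     # Toggle selection by dash-stripped key: one counting pass, then a replay
--     # pass that drops, per key, the entries that were toggled off.
--     alive = {}     # key -> number of currently-selected entries with that key
--     appended = []  # every selected name, in append order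
--     removed = {}   # key -> how many of its earliest entries were toggled off
--     for name, flag in zip(names, indv):
--         if flag:
--             key = name.replace('-', '')
--             if alive.get(key, 0) > 0:
--                 alive[key] -= 1
--                 removed[key] = removed.get(key, 0) + 1
--             else:
--                 alive[key] = alive.get(key, 0) + 1
--                 appended.append(name)
--     out = []
--     seen = {}
--     for name in appended:
--         key = name.replace('-', '')
--         k = seen.get(key, 0)
--         seen[key] = k + 1
--         if k >= removed.get(key, 0):
--             out.append(name)
--     return out
-- ===== Notes on version B (the rewrite author's own statement) =====
-- stated objective: faster
-- what changed: A scans the chosen list for membership and removes first occurrences in place (quadratic); B does one counting pass over zip(names, indv) keyed by the dash-stripped name (alive counts, removal counts) and then a replay pass that drops, per key, its earliest removed entries, so no list is ever scanned.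
-- intended difference: On inputs where a selected name containing '-' is later followed by another selected name with the same dash-stripped key, A never toggles the dashed entry off (it compares the stripped key against the stored dashed name, so e.g. ga_chose(['a-b','ab'],[1,1]) returns ['a-b','ab']) while B returns [] by toggling consistently on the stripped key, which is the intended dash-insensitive toggle. — e.g. on ga_chose(["a-b", "ab"], [1, 1]): A returns ["a-b", "ab"], B returns []
import Mathlib
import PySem

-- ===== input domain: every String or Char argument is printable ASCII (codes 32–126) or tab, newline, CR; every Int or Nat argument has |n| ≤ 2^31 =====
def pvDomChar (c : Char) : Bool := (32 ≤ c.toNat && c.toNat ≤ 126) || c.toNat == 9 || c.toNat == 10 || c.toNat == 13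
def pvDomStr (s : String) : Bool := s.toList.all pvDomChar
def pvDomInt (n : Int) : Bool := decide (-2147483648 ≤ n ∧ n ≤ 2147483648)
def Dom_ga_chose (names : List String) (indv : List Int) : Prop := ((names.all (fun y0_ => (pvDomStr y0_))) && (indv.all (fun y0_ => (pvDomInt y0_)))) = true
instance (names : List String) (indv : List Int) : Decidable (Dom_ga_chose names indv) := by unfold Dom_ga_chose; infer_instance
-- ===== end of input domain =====

-- B replaces A's repeated list membership tests and first-occurrence removals by one counting
-- pass keyed by the dash-stripped name plus a replay pass (faster); on inputs where a selected
-- dashed name is later toggled via its stripped key (D_ below) A fails to remove it and B does.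

-- ===== PORT A =====
-- loop body of A's 'for i in range(len(indv))' (none threads a raised IndexError)
def pvBodyA (names : List String) (indv : List Int) (acc : Option (List String)) (i : Int) : Option (List String) :=
  match acc with
  | none => none
  | some chosen =>
    match PySem.List.pyGet? indv i with
    | none => none
    | some v =>
      if v ≠ 0 then
        match PySem.List.pyGet? names i with
        | none => none
        | some nm =>
          let s := PySem.Str.replace nm "-" ""
          if chosen.contains s then some ((PySem.List.remove? chosen s).getD chosen)
          else some (chosen ++ [nm])
      else some chosen

def ga_chose (names : List String) (indv : List Int) : List String :=
  ((PySem.List.pyRange 0 (indv.length : Int) 1).foldl (pvBodyA names indv)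
    (some ([] : List String))).getD []

-- ===== PORT B =====
-- body of B's first loop 'for name, flag in zip(names, indv)': state (alive, appended, removed)
def pvStepB1 (st : PySem.Dict String Int × List String × PySem.Dict String Int) (p : String × Int) :
    PySem.Dict String Int × List String × PySem.Dict String Int :=
  if p.2 ≠ 0 then
    let key := PySem.Str.replace p.1 "-" ""
    if st.1.getD key 0 > 0 then
      (st.1.insert key (st.1.getD key 0 - 1), st.2.1, st.2.2.insert key (st.2.2.getD key 0 + 1))
    else
      (st.1.insert key (st.1.getD key 0 + 1), st.2.1 ++ [p.1], st.2.2)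
  else st

-- body of B's replay loop 'for name in appended': state (out, seen)
def pvStepB2 (removed : PySem.Dict String Int) (os : List String × PySem.Dict String Int) (name : String) :
    List String × PySem.Dict String Int :=
  let key := PySem.Str.replace name "-" ""
  let k := os.2.getD key 0
  if k ≥ removed.getD key 0 then (os.1 ++ [name], os.2.insert key (k + 1))
  else (os.1, os.2.insert key (k + 1))

def ga_chose_alt (names : List String) (indv : List Int) : List String :=
  let st := (names.zip indv).foldl pvStepB1 (PySem.Dict.empty, [], PySem.Dict.empty)
  (st.2.1.foldl (pvStepB2 st.2.2) ([], PySem.Dict.empty)).1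

-- ===== PRECONDITION & SPEC =====
-- the dash-stripped key of a name (used by D_ below)
def pvStrip (x : String) : String := PySem.Str.replace x "-" ""

-- Pre_ excludes exactly the inputs on which A raises IndexError (a nonzero indv entry at an
-- index ≥ len(names)); A returns normally on every input admitted here.
def Pre_ga_chose (names : List String) (indv : List Int) : Prop :=
  ∀ x ∈ indv.drop names.length, x = 0
instance (names : List String) (indv : List Int) : Decidable (Pre_ga_chose names indv) := by unfold Pre_ga_chose; infer_instance

def pvWitness_ga_chose : List String × List Int := (["a", "b", "c"], [1, 1, 1])

-- On inputs where a selected (nonzero-flag) name containing '-' is later followed by another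
-- selected name with the same dash-stripped key, A returns a list in which the dashed entry is
-- never toggled off (its membership test compares the stripped key to the stored dashed name),
-- while B toggles consistently on the stripped key — the intended dash-insensitive toggle.
def D_ga_chose (names : List String) (indv : List Int) : Prop :=
  ¬ List.Pairwise
      (fun p q => p.2 ≠ 0 → q.2 ≠ 0 → pvStrip p.1 = pvStrip q.1 → p.1 = pvStrip p.1)
      (names.zip indv)
instance (names : List String) (indv : List Int) : Decidable (D_ga_chose names indv) := by unfold D_ga_chose; infer_instance

def Spec_ga_chose (names : List String) (indv : List Int) (out : List String) : Prop := ¬ D_ga_chose names indv → out = ga_chose_alt names indv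
instance (names : List String) (indv : List Int) (out : List String) : Decidable (Spec_ga_chose names indv out) := by unfold Spec_ga_chose; infer_instance

def pvDiffWitness_ga_chose : List String × List Int := (["a-b", "ab"], [1, 1])
def pvDiffWitnessOut_ga_chose : (List String) × (List String) := (["a-b", "ab"], [])

-- ===== CLAIM (what is proved, stated in full; the proofs are below) =====
def Claim_unchanged_ga_chose : Prop := ∀ (names : List String) (indv : List Int), Dom_ga_chose names indv → Pre_ga_chose names indv → Spec_ga_chose names indv (ga_chose names indv)
def Claim_changed_ga_chose : Prop := Dom_ga_chose (pvDiffWitness_ga_chose.1) (pvDiffWitness_ga_chose.2) ∧ Pre_ga_chose (pvDiffWitness_ga_chose.1) (pvDiffWitness_ga_chose.2) ∧ D_ga_chose (pvDiffWitness_ga_chose.1) (pvDiffWitness_ga_chose.2) ∧ ga_chose (pvDiffWitness_ga_chose.1) (pvDiffWitness_ga_chose.2) = pvDiffWitnessOut_ga_chose.1 ∧ ga_chose_alt (pvDiffWitness_ga_chose.1) (pvDiffWitness_ga_chose.2) = pvDiffWitnessOut_ga_chose.2 ∧ pvDiffWitnessOut_ga_chose.1 ≠ pvDiffWitnessOut_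ga_chose.2

-- ===== LEMMAS AND PROOFS =====

-- replace.go with old = ['-'], new = [] is a filter (enough fuel)
lemma pvGo_filter : ∀ (l : List Char) (fuel : Nat) (acc : List Char), l.length ≤ fuel →
    PySem.Chars.replace.go ['-'] [] fuel l acc = acc.reverse ++ l.filter (· != '-') := by
  intro l
  induction l with
  | nil =>
      intro fuel acc _
      cases fuel <;> simp [PySem.Chars.replace.go]
  | cons c t ih =>
      intro fuel acc h
      cases fuel with
      | zero => simp at h
      | succ n =>
          rw [PySem.Chars.replace.go]
          by_cases hc : c = '-'
          · subst hc
            rw [if_pos (by simp [List.isPrefixOf])]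
            rw [show List.drop (['-'] : List Char).length ('-' :: t) = t from rfl]
            simp only [List.reverse_nil, List.nil_append]
            rw [ih n acc (by simpa using h)]
            simp
          · rw [if_neg (by simp [List.isPrefixOf]; exact Ne.symm hc)]
            rw [ih n (c :: acc) (by simpa using h)]
            simp [hc]

lemma pvStrip_toList (x : String) : (pvStrip x).toList = x.toList.filter (· != '-') := by
  unfold pvStrip
  rw [PySem.Str.replace]
  have h1 : ("-" : String).toList = ['-'] := by decide
  have h2 : ("" : String).toList = [] := by decide
  rw [h1, h2, PySem.Chars.replace]
  rw [if_neg (by decide)]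
  rw [pvGo_filter _ _ _ le_rfl]
  simp

lemma pvStrip_idem (x : String) : pvStrip (pvStrip x) = pvStrip x := by
  apply String.toList_injective
  rw [pvStrip_toList, pvStrip_toList, List.filter_filter]
  simp

-- drop, for each key k (= dash-stripped value), the first (d k) elements with that key
def pvSkipK : List String → (String → Nat) → List String
  | [], _ => []
  | x :: xs, d =>
      if d (pvStrip x) = 0 then x :: pvSkipK xs d
      else pvSkipK xs (fun v => if v = pvStrip x then d v - 1 else d v)

-- number of elements of l with key k
def pvCountK (k : String) (l : List String) : Nat := (l.filter (fun x => pvStrip x == k)).length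

lemma pvCountK_cons (k x : String) (l : List String) :
    pvCountK k (x :: l) = pvCountK k l + (if pvStrip x = k then 1 else 0) := by
  unfold pvCountK
  by_cases h : pvStrip x = k <;> simp [h]

lemma pvCountK_append (k x : String) (l : List String) :
    pvCountK k (l ++ [x]) = pvCountK k l + (if pvStrip x = k then 1 else 0) := by
  unfold pvCountK
  by_cases h : pvStrip x = k <;> simp [h]

-- membership of the literal key s, when all key-s elements of l equal s
lemma pvMem_skipK : ∀ (l : List String) (d : String → Nat) (s : String),
    pvStrip s = s → (∀ x ∈ l, pvStrip x = s → x = s) →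
    (s ∈ pvSkipK l d ↔ d s < pvCountK s l) := by
  intro l
  induction l with
  | nil => intro d s _ _; simp [pvSkipK, pvCountK]
  | cons x xs ih =>
      intro d s hss Hs
      have Hs' : ∀ x ∈ xs, pvStrip x = s → x = s := fun y hy => Hs y (List.mem_cons_of_mem _ hy)
      by_cases hk : pvStrip x = s
      · have hx : x = s := Hs x List.mem_cons_self hk
        by_cases hd : d (pvStrip x) = 0
        · rw [pvSkipK, if_pos hd, pvCountK_cons, if_pos hk, hx]
          rw [hk] at hd
          constructor
          · intro _; omega
          · intro _; exact List.mem_cons_self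
        · rw [pvSkipK, if_neg hd, pvCountK_cons, if_pos hk, ih _ s hss Hs', hk,
            if_pos rfl]
          rw [hk] at hd
          omega
      · have hxs : x ≠ s := by
          intro he; exact hk (by rw [he, hss])
        by_cases hd : d (pvStrip x) = 0
        · rw [pvSkipK, if_pos hd, pvCountK_cons, if_neg hk, List.mem_cons, ih _ s hss Hs']
          simp [Ne.symm hxs]
        · rw [pvSkipK, if_neg hd, pvCountK_cons, if_neg hk, ih _ s hss Hs',
            if_neg (fun h : s = pvStrip x => hk h.symm)]
          omega

lemma pvErase_skipK : ∀ (l : List String) (d : String → Nat) (s : String),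
    pvStrip s = s → (∀ x ∈ l, pvStrip x = s → x = s) →
    d s < pvCountK s l →
    (pvSkipK l d).erase s = pvSkipK l (fun v => if v = s then d v + 1 else d v) := by
  intro l
  induction l with
  | nil => intro d s _ _ h; simp [pvCountK] at h
  | cons x xs ih =>
      intro d s hss Hs h
      have Hs' : ∀ x ∈ xs, pvStrip x = s → x = s := fun y hy => Hs y (List.mem_cons_of_mem _ hy)
      by_cases hk : pvStrip x = s
      · have hx : x = s := Hs x List.mem_cons_self hk
        by_cases hd : d (pvStrip x) = 0
        · rw [pvSkipK, if_pos hd, pvSkipK, hk, if_neg (by simp [hk ▸ hd])]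
          rw [hx, List.erase_cons_head]
          congr 1
          funext v
          rw [hk] at hd
          by_cases hv : v = s <;> simp [hv, hd]
        · rw [pvSkipK, if_neg hd, pvSkipK, hk,
            if_neg (by rw [hk] at hd; simp [hd])]
          rw [pvCountK_cons, if_pos hk] at h
          rw [hk] at hd
          rw [ih _ s hss Hs' (by rw [if_pos rfl]; omega)]
          congr 1
          funext v
          by_cases hv : v = s <;> simp [hv, hk] <;> omega
      · have hxs : x ≠ s := fun he => hk (by rw [he, hss])
        rw [pvCountK_cons, if_neg hk] at h
        by_cases hd : d (pvStrip x) = 0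
        · rw [pvSkipK, if_pos hd, pvSkipK, if_pos (by simp [fun h' : pvStrip x = s => hk h', hd]),
            List.erase_cons_tail (by simp [hxs]), ih _ s hss Hs' (by omega)]
        · rw [pvSkipK, if_neg hd, pvSkipK, if_neg (by simp [fun h' : pvStrip x = s => hk h', hd]),
            ih _ s hss Hs' (by rw [if_neg (fun h' : s = pvStrip x => hk h'.symm)]; omega)]
          congr 1
          funext v
          by_cases hvx : v = pvStrip x
          · have hvs : v ≠ s := fun he => hk (hvx ▸ he)
            simp [hvx, hvs, hk]
          · by_cases hvs : v = s
            · have hsx : s ≠ pvStrip x := fun h' => hk h'.symm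
              simp [hvs, hsx]
            · simp [hvx, hvs]

lemma pvSkipK_append : ∀ (l : List String) (d : String → Nat) (x : String),
    d (pvStrip x) ≤ pvCountK (pvStrip x) l →
    pvSkipK (l ++ [x]) d = pvSkipK l d ++ [x] := by
  intro l
  induction l with
  | nil =>
      intro d x h
      simp [pvCountK] at h
      simp [pvSkipK, h]
  | cons y ys ih =>
      intro d x h
      rw [pvCountK_cons] at h
      by_cases hy : d (pvStrip y) = 0
      · have h' : d (pvStrip x) ≤ pvCountK (pvStrip x) ys := by
          by_cases hxy : pvStrip y = pvStrip x
          · rw [← hxy, hy]; omega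
          · rw [if_neg hxy] at h; omega
        rw [List.cons_append, pvSkipK, if_pos hy, pvSkipK, if_pos hy, ih d x h',
          List.cons_append]
      · have h' : (if pvStrip x = pvStrip y then d (pvStrip x) - 1 else d (pvStrip x))
            ≤ pvCountK (pvStrip x) ys := by
          by_cases hxy : pvStrip x = pvStrip y
          · rw [if_pos hxy]
            rw [if_pos hxy.symm] at h
            omega
          · rw [if_neg hxy]
            rw [if_neg (fun h' : pvStrip y = pvStrip x => hxy h'.symm)] at h
            omega
        rw [List.cons_append, pvSkipK, if_neg hy, pvSkipK, if_neg hy]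
        exact ih _ x h'

-- the zip-level body of A's loop (proof-side only)
def pvStepA (chosen : List String) (p : String × Int) : List String :=
  if p.2 ≠ 0 then
    let s := PySem.Str.replace p.1 "-" ""
    if chosen.contains s then (PySem.List.remove? chosen s).getD chosen
    else chosen ++ [p.1]
  else chosen

-- invariant tying A's chosen list to B's (alive, appended, removed) state
def pvInv (st : PySem.Dict String Int × List String × PySem.Dict String Int) : Prop :=
  (∀ k, st.1.getD k 0 = (pvCountK k st.2.1 : Int) - st.2.2.getD k 0) ∧
  (∀ k, 0 ≤ st.2.2.getD k 0 ∧ st.2.2.getD k 0 ≤ (pvCountK k st.2.1 : Int))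

def pvChosen (st : PySem.Dict String Int × List String × PySem.Dict String Int) : List String :=
  pvSkipK st.2.1 (fun k => (st.2.2.getD k 0).toNat)

lemma pvStep_one (st : PySem.Dict String Int × List String × PySem.Dict String Int)
    (p : String × Int) (h : pvInv st)
    (hp : p.2 ≠ 0 → ∀ x ∈ st.2.1, pvStrip x = pvStrip p.1 → x = pvStrip p.1) :
    pvInv (pvStepB1 st p) ∧ pvStepA (pvChosen st) p = pvChosen (pvStepB1 st p) ∧
      (∀ x ∈ (pvStepB1 st p).2.1, x ∈ st.2.1 ∨ (x = p.1 ∧ p.2 ≠ 0)) := by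
  obtain ⟨h1, h2⟩ := h
  by_cases hf : p.2 ≠ 0
  · simp only [pvStepB1, pvStepA, if_pos hf]
    have hkey : PySem.Str.replace p.1 "-" "" = pvStrip p.1 := rfl
    rw [hkey]
    set s := pvStrip p.1 with hs
    have hss : pvStrip s = s := pvStrip_idem p.1
    have Hs : ∀ x ∈ st.2.1, pvStrip x = s → x = s := hp hf
    by_cases hc : st.1.getD s 0 > 0
    · rw [if_pos hc]
      have hcount : (st.2.2.getD s 0).toNat < pvCountK s st.2.1 := by
        have := h1 s; have := h2 s; omega
      have hmem : s ∈ pvChosen st := by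
        rw [pvChosen, pvMem_skipK _ _ _ hss Hs]; exact hcount
      rw [if_pos (by simpa using hmem), PySem.List.remove?_eq_some_erase _ _ hmem,
        Option.getD_some]
      refine ⟨⟨?_, ?_⟩, ?_, ?_⟩
      · intro k
        simp only [PySem.Dict.getD_insert]
        have e1 := h1 k
        by_cases hv : k = s
        · subst hv; rw [if_pos rfl, if_pos rfl]; omega
        · rw [if_neg hv, if_neg hv]; exact e1
      · intro k
        simp only [PySem.Dict.getD_insert]
        have e1 := h2 k; have e3 := h1 s
        by_cases hv : k = s
        · subst hv; rw [if_pos rfl]; have := h2 s; omega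
        · rw [if_neg hv]; exact e1
      · rw [pvChosen, pvChosen, pvErase_skipK _ _ _ hss Hs hcount]
        congr 1
        funext k
        simp only [PySem.Dict.getD_insert]
        have e2 := h2 s
        by_cases hv : k = s
        · subst hv; rw [if_pos rfl, if_pos rfl]; omega
        · rw [if_neg hv, if_neg hv]
      · intro x hx; exact Or.inl hx
    · rw [if_neg hc]
      have hge : pvCountK s st.2.1 ≤ (st.2.2.getD s 0).toNat := by
        have := h1 s; have := h2 s; omega
      have hnmem : s ∉ pvChosen st := by
        rw [pvChosen, pvMem_skipK _ _ _ hss Hs]; omega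
      rw [if_neg (by simpa using hnmem)]
      refine ⟨⟨?_, ?_⟩, ?_, ?_⟩
      · intro k
        have e1 := h1 k
        simp only [PySem.Dict.getD_insert, pvCountK_append, ← hs]
        by_cases hv : k = s
        · subst hv; rw [if_pos rfl, if_pos rfl]; push_cast; omega
        · rw [if_neg hv, if_neg (fun h : s = k => hv h.symm)]
          push_cast; omega
      · intro k
        have e1 := h2 k
        simp only [pvCountK_append, ← hs]
        by_cases hv : s = k
        · rw [if_pos hv]; push_cast; omega
        · rw [if_neg hv]; push_cast; omega
      · rw [pvChosen, pvChosen]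
        have happ : (st.2.2.getD (pvStrip p.1) 0).toNat ≤ pvCountK (pvStrip p.1) st.2.1 := by
          rw [← hs]; have := h2 s; omega
        exact (pvSkipK_append _ _ _ happ).symm
      · intro x hx
        rcases List.mem_append.mp hx with hx | hx
        · exact Or.inl hx
        · simp at hx; exact Or.inr ⟨hx, hf⟩
  · simp only [pvStepB1, pvStepA, if_neg hf]
    exact ⟨⟨h1, h2⟩, trivial, fun x hx => Or.inl hx⟩

lemma pvLoop : ∀ (pairs : List (String × Int)) (st : PySem.Dict String Int × List String × PySem.Dict String Int),
    pvInv st →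
    (∀ x ∈ st.2.1, ∀ q ∈ pairs, q.2 ≠ 0 → pvStrip x = pvStrip q.1 → x = pvStrip q.1) →
    List.Pairwise (fun p q => p.2 ≠ 0 → q.2 ≠ 0 → pvStrip p.1 = pvStrip q.1 → p.1 = pvStrip p.1) pairs →
    pvInv (pairs.foldl pvStepB1 st) ∧
      pairs.foldl pvStepA (pvChosen st) = pvChosen (pairs.foldl pvStepB1 st) := by
  intro pairs
  induction pairs with
  | nil => intro st h _ _; exact ⟨h, rfl⟩
  | cons p ps ih =>
      intro st h hmem hpw
      rw [List.pairwise_cons] at hpw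
      obtain ⟨hpw1, hpw2⟩ := hpw
      have hp : p.2 ≠ 0 → ∀ x ∈ st.2.1, pvStrip x = pvStrip p.1 → x = pvStrip p.1 := by
        intro hf x hx hsx
        exact hmem x hx p List.mem_cons_self hf hsx
      obtain ⟨h1, h2, h3⟩ := pvStep_one st p h hp
      have hmem' : ∀ x ∈ (pvStepB1 st p).2.1, ∀ q ∈ ps, q.2 ≠ 0 → pvStrip x = pvStrip q.1 → x = pvStrip q.1 := by
        intro x hx q hq hqf hsx
        rcases h3 x hx with hx' | ⟨hx', hf⟩
        · exact hmem x hx' q (List.mem_cons_of_mem _ hq) hqf hsx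
        · subst hx'
          have := hpw1 q hq hf hqf hsx
          rw [this, ← hsx, this]
      obtain ⟨g1, g2⟩ := ih (pvStepB1 st p) h1 hmem' hpw2
      exact ⟨g1, by rw [List.foldl_cons, List.foldl_cons, h2, g2]⟩

lemma pvPass2 (removed : PySem.Dict String Int) :
    ∀ (l : List String) (out : List String) (seen : PySem.Dict String Int),
    (l.foldl (pvStepB2 removed) (out, seen)).1
      = out ++ pvSkipK l (fun k => (removed.getD k 0 - seen.getD k 0).toNat) := by
  intro l
  induction l with
  | nil => intro out seen; simp [pvSkipK]
  | cons x xs ih =>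
      intro out seen
      rw [List.foldl_cons]
      have hkey : PySem.Str.replace x "-" "" = pvStrip x := rfl
      by_cases hc : seen.getD (pvStrip x) 0 ≥ removed.getD (pvStrip x) 0
      · rw [show pvStepB2 removed (out, seen) x
              = (out ++ [x], seen.insert (pvStrip x) (seen.getD (pvStrip x) 0 + 1)) by
            simp [pvStepB2, hkey, hc]]
        rw [ih, List.append_assoc]
        congr 1
        rw [pvSkipK, if_pos (by omega), List.singleton_append]
        congr 2
        funext k
        simp only [PySem.Dict.getD_insert]
        by_cases hv : k = pvStrip x
        · subst hv; rw [if_pos rfl]; omega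
        · rw [if_neg hv]
      · rw [show pvStepB2 removed (out, seen) x
              = (out, seen.insert (pvStrip x) (seen.getD (pvStrip x) 0 + 1)) by
            simp [pvStepB2, hkey]; omega]
        rw [ih, pvSkipK, if_neg (by omega)]
        congr 1
        congr 1
        funext k
        simp only [PySem.Dict.getD_insert]
        by_cases hv : k = pvStrip x
        · subst hv; rw [if_pos rfl, if_pos rfl]; omega
        · rw [if_neg hv, if_neg hv]

lemma pvRangeZip (names : List String) (indv : List Int) :
    ∀ (n k : Nat) (acc : List String),
    indv.length - k ≤ n →
    (∀ x ∈ indv.drop names.length, x = 0) →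
    (PySem.List.pyRange (k : Int) (indv.length : Int) 1).foldl (pvBodyA names indv) (some acc)
      = some (((names.drop k).zip (indv.drop k)).foldl pvStepA acc) := by
  intro n
  induction n with
  | zero =>
      intro k acc hn _
      have hk : indv.length ≤ k := by omega
      rw [PySem.List.pyRange_one_eq_nil (by exact_mod_cast hk),
        List.drop_eq_nil_of_le hk, List.zip_nil_right]
      rfl
  | succ n ih =>
      intro k acc hn h0
      by_cases hk : indv.length ≤ k
      · rw [PySem.List.pyRange_one_eq_nil (by exact_mod_cast hk),
          List.drop_eq_nil_of_le hk, List.zip_nil_right]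
        rfl
      · have hk' : k < indv.length := by omega
        rw [PySem.List.pyRange_one_cons (by exact_mod_cast hk'), List.foldl_cons]
        have hgi : PySem.List.pyGet? indv (k : Int) = some indv[k] := by
          rw [PySem.List.pyGet?_natCast, List.getElem?_eq_getElem hk']
        by_cases hv : indv[k] = 0
        · have hb : pvBodyA names indv (some acc) (k : Int) = some acc := by
            rw [pvBodyA, hgi]; simp [hv]
          rw [hb]
          have ih' := ih (k + 1) acc (by omega) h0
          push_cast at ih'
          rw [ih']
          by_cases hkn : k < names.length
          · rw [List.drop_eq_getElem_cons hkn, List.drop_eq_getElem_cons hk',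
              List.zip_cons_cons, List.foldl_cons]
            have : pvStepA acc (names[k], indv[k]) = acc := by
              simp [pvStepA, hv]
            rw [this]
          · have h1 : names.drop k = [] := List.drop_eq_nil_of_le (by omega)
            have h2 : names.drop (k + 1) = [] := List.drop_eq_nil_of_le (by omega)
            rw [h1, h2, List.zip_nil_left, List.zip_nil_left]
        · have hkn : k < names.length := by
            by_contra hkn
            have hmem : indv[k] ∈ indv.drop names.length := by
              have hlt : k - names.length < (indv.drop names.length).length := by
                simp [List.length_drop]; omega
              have : (indv.drop names.length)[k - names.length] = indv[k] := by
                rw [List.getElem_drop]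
                congr 1
                omega
              rw [← this]
              exact List.getElem_mem hlt
            exact hv (h0 _ hmem)
          have hgn : PySem.List.pyGet? names (k : Int) = some names[k] := by
            rw [PySem.List.pyGet?_natCast, List.getElem?_eq_getElem hkn]
          have hb : pvBodyA names indv (some acc) (k : Int)
              = some (pvStepA acc (names[k], indv[k])) := by
            rw [pvBodyA, hgi]
            simp only [if_pos hv, hgn, pvStepA]
            split <;> rfl
          rw [hb]
          have ih' := ih (k + 1) (pvStepA acc (names[k], indv[k])) (by omega) h0
          push_cast at ih'
          rw [ih', List.drop_eq_getElem_cons hkn, List.drop_eq_getElem_cons hk',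
            List.zip_cons_cons, List.foldl_cons]

-- ===== VERDICT (by name: the statement is the Claim_ definition above) =====
theorem ga_chose_spec : Claim_unchanged_ga_chose := by
  intro names indv _ hpre
  unfold Spec_ga_chose
  intro hnd
  have hpw : List.Pairwise
      (fun p q => p.2 ≠ 0 → q.2 ≠ 0 → pvStrip p.1 = pvStrip q.1 → p.1 = pvStrip p.1)
      (names.zip indv) := not_not.mp hnd
  have hA : ga_chose names indv = (names.zip indv).foldl pvStepA [] := by
    unfold ga_chose
    have h := pvRangeZip names indv indv.length 0 [] (by omega) hpre
    push_cast at h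
    rw [h, List.drop_zero, List.drop_zero, Option.getD_some]
  have hB : ga_chose_alt names indv
      = pvChosen ((names.zip indv).foldl pvStepB1 (PySem.Dict.empty, [], PySem.Dict.empty)) := by
    unfold ga_chose_alt
    rw [pvPass2]
    simp [pvChosen, PySem.Dict.getD_empty]
  have h0 : pvInv (PySem.Dict.empty, [], PySem.Dict.empty) := by
    constructor <;> intro k <;> simp [PySem.Dict.getD_empty, pvCountK]
  obtain ⟨_, hloop⟩ := pvLoop (names.zip indv) _ h0 (by intro x hx; simp at hx) hpw
  rw [hA, hB, ← hloop]
  simp [pvChosen, pvSkipK]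

theorem ga_chose_changed : Claim_changed_ga_chose := by
  unfold Claim_changed_ga_chose; decide
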